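-- pv_equiv track=rewrite | github.com/10U-Labs/assert-no-linter-config-files | src/assert_no_linter_config_files/scanner.py | get_config_files_for_linters
-- ===== SOURCE A (Python) =====
-- DEDICATED_CONFIG_FILES: dict[str, str] = {
--     ".pylintrc": "pylint",
--     "pylintrc": "pylint",
--     ".pylintrc.toml": "pylint",
--     "pytest.ini": "pytest",
--     "mypy.ini": "mypy",
--     ".mypy.ini": "mypy",
--     ".yamllint": "yamllint",
--     ".yamllint.yml": "yamllint",
--     ".yamllint.yaml": "yamllint",
--     ".jscpd.json": "jscpd",
--     ".jscpd.yml": "jscpd",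
--     ".jscpd.yaml": "jscpd",
--     ".jscpd.toml": "jscpd",
--     ".jscpdrc": "jscpd",
--     ".jscpdrc.json": "jscpd",
--     ".jscpdrc.yml": "jscpd",
--     ".jscpdrc.yaml": "jscpd",
-- }
--
-- SHARED_CONFIG_SECTIONS: dict[str, dict[str, str]] = {
--     "pylint": {
--         "pyproject.toml": "[tool.pylint.*]",
--         "setup.cfg": "[pylint.*]",
--         "tox.ini": "[pylint.*]",
--     },
--     "pytest": {
--         "pyproject.toml": "[tool.pytest.ini_options]",
--         "setup.cfg": "[tool:pytest]",
--         "tox.ini": "[pytest] or [tool:pytest]",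
--     },
--     "mypy": {
--         "pyproject.toml": "[tool.mypy]",
--         "setup.cfg": "[mypy]",
--         "tox.ini": "[mypy]",
--     },
--     "yamllint": {
--         "pyproject.toml": "[tool.yamllint.*]",
--     },
--     "jscpd": {
--         "pyproject.toml": "[tool.jscpd.*]",
--     },
-- }
--
-- def get_config_files_for_linters(linters: frozenset[str]) -> dict[str, list[str]]:
--     """Get the config files that will be checked for each linter.
--
--     Args:
--         linters: Set of linter names to get config files for.
--
--     Returns:
--         Dictionary mapping each linter to its list of config file descriptions.
--     """
--     result: dict[str, list[str]] = {}
--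
--     for linter in sorted(linters):
--         configs: list[str] = []
--
--         # Add dedicated config files
--         dedicated = sorted(
--             filename for filename, tool in DEDICATED_CONFIG_FILES.items()
--             if tool == linter
--         )
--         configs.extend(dedicated)
--
--         # Add shared config sections
--         if linter in SHARED_CONFIG_SECTIONS:
--             for shared_file, section in SHARED_CONFIG_SECTIONS[linter].items():
--                 configs.append(f"{section} in {shared_file}")
--
--         result[linter] = configs
--
--     return result
-- ===== SOURCE B (Python) =====
-- DEDICATED_CONFIG_FILES: dict[str, str] = {
--     ".pylintrc": "pylint",
--     "pylintrc": "pylint",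
--     ".pylintrc.toml": "pylint",
--     "pytest.ini": "pytest",
--     "mypy.ini": "mypy",
--     ".mypy.ini": "mypy",
--     ".yamllint": "yamllint",
--     ".yamllint.yml": "yamllint",
--     ".yamllint.yaml": "yamllint",
--     ".jscpd.json": "jscpd",
--     ".jscpd.yml": "jscpd",
--     ".jscpd.yaml": "jscpd",
--     ".jscpd.toml": "jscpd",
--     ".jscpdrc": "jscpd",
--     ".jscpdrc.json": "jscpd",
--     ".jscpdrc.yml": "jscpd",
--     ".jscpdrc.yaml": "jscpd",
-- }
--
-- SHARED_CONFIG_SECTIONS: dict[str, dict[str, str]] = {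
--     "pylint": {
--         "pyproject.toml": "[tool.pylint.*]",
--         "setup.cfg": "[pylint.*]",
--         "tox.ini": "[pylint.*]",
--     },
--     "pytest": {
--         "pyproject.toml": "[tool.pytest.ini_options]",
--         "setup.cfg": "[tool:pytest]",
--         "tox.ini": "[pytest] or [tool:pytest]",
--     },
--     "mypy": {
--         "pyproject.toml": "[tool.mypy]",
--         "setup.cfg": "[mypy]",
--         "tox.ini": "[mypy]",
--     },
--     "yamllint": {
--         "pyproject.toml": "[tool.yamllint.*]",
--     },
--     "jscpd": {
--         "pyproject.toml": "[tool.jscpd.*]",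
--     },
-- }
--
--
-- def get_config_files_for_linters(linters):
--     # Build an inverted index tool -> list of dedicated filenames, once.
--     index: dict[str, list[str]] = {}
--     for filename, tool in DEDICATED_CONFIG_FILES.items():
--         index.setdefault(tool, []).append(filename)
--
--     result: dict[str, list[str]] = {}
--     for linter in sorted(linters):
--         result[linter] = sorted(index.get(linter, [])) + [
--             f"{section} in {shared_file}"
--             for shared_file, section in SHARED_CONFIG_SECTIONS.get(linter, {}).items()
--         ]
--     return result
-- ===== Notes on version B (the rewrite author's own statement) =====
-- stated objective: alternative
-- what changed: B replaces A's per-linter full scan of DEDICATED_CONFIG_FILES (a filtered generator re-run for every linter) with a tool->filenames inverted index built in one pass via setdefault, then a dict lookup per linter; the per-linter result is built as one expression (sorted lookup + shared-section comprehension) instead of A's extend/append loop.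
import Mathlib
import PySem

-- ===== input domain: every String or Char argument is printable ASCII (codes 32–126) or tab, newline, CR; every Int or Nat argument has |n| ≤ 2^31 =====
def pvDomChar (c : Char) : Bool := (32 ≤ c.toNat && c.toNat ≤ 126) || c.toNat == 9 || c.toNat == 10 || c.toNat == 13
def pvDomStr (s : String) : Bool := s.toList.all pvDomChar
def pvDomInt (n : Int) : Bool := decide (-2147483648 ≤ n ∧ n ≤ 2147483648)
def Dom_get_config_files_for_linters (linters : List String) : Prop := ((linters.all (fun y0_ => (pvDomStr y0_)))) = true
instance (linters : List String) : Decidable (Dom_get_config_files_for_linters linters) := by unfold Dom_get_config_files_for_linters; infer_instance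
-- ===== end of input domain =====

-- B builds the tool→filenames inverted index once instead of re-scanning DEDICATED_CONFIG_FILES per linter (objective: alternative/idiomatic; any speedup is a constant factor and is not claimed).

-- ===== PORT A =====
-- module constant DEDICATED_CONFIG_FILES (insertion-ordered dict, as its pair list and as a Dict)
def pvDEDpairs : List (String × String) :=
  [(".pylintrc", "pylint"), ("pylintrc", "pylint"), (".pylintrc.toml", "pylint"),
   ("pytest.ini", "pytest"), ("mypy.ini", "mypy"), (".mypy.ini", "mypy"),
   (".yamllint", "yamllint"), (".yamllint.yml", "yamllint"), (".yamllint.yaml", "yamllint"),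
   (".jscpd.json", "jscpd"), (".jscpd.yml", "jscpd"), (".jscpd.yaml", "jscpd"),
   (".jscpd.toml", "jscpd"), (".jscpdrc", "jscpd"), (".jscpdrc.json", "jscpd"),
   (".jscpdrc.yml", "jscpd"), (".jscpdrc.yaml", "jscpd")]

-- module constant SHARED_CONFIG_SECTIONS
def pvSHARED : PySem.Dict String (PySem.Dict String String) :=
  PySem.Dict.mk
    [("pylint", PySem.Dict.mk [("pyproject.toml", "[tool.pylint.*]"), ("setup.cfg", "[pylint.*]"), ("tox.ini", "[pylint.*]")]),
     ("pytest", PySem.Dict.mk [("pyproject.toml", "[tool.pytest.ini_options]"), ("setup.cfg", "[tool:pytest]"), ("tox.ini", "[pytest] or [tool:pytest]")]),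
     ("mypy", PySem.Dict.mk [("pyproject.toml", "[tool.mypy]"), ("setup.cfg", "[mypy]"), ("tox.ini", "[mypy]")]),
     ("yamllint", PySem.Dict.mk [("pyproject.toml", "[tool.yamllint.*]")]),
     ("jscpd", PySem.Dict.mk [("pyproject.toml", "[tool.jscpd.*]")])]

-- A's loop body: configs for one linter (dedicated = sorted filter over the whole dict, then shared sections appended)
def pvCfgA (linter : String) : List String :=
  let dedicated : List String :=
    PySem.List.sorted ((pvDEDpairs.filter (fun p => p.2 == linter)).map (fun p => p.1)) (fun x => x.toList) false
  let configs : List String := [] ++ dedicated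
  if pvSHARED.contains linter then
    match pvSHARED.get? linter with
    | some m => m.items.foldl (fun acc p => acc ++ [p.2 ++ " in " ++ p.1]) configs
    | none => configs
  else configs

def get_config_files_for_linters (linters : List String) : List (String × List String) :=
  ((PySem.List.sorted linters (fun x => x.toList) false).foldl
    (fun (result : PySem.Dict String (List String)) linter => result.insert linter (pvCfgA linter))
    PySem.Dict.empty).items

-- ===== PORT B =====
-- B's inverted index: one pass over DEDICATED_CONFIG_FILES, tool -> its filenames (setdefault+append = Dict.modify)
def pvIndexB : PySem.Dict String (List String) :=
  pvDEDpairs.foldl (fun d p => d.modify p.2 [] (fun xs => xs ++ [p.1])) PySem.Dict.empty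

-- B's loop body: O(1) index lookup sorted, plus the shared-section comprehension
def pvCfgB (linter : String) : List String :=
  PySem.List.sorted (pvIndexB.getD linter []) (fun x => x.toList) false
    ++ ((pvSHARED.getD linter PySem.Dict.empty).items.map (fun p => p.2 ++ " in " ++ p.1))

def get_config_files_for_linters_alt (linters : List String) : List (String × List String) :=
  ((PySem.List.sorted linters (fun x => x.toList) false).foldl
    (fun (result : PySem.Dict String (List String)) linter => result.insert linter (pvCfgB linter))
    PySem.Dict.empty).items

-- ===== PRECONDITION & SPEC =====
def Spec_get_config_files_for_linters (linters : List String) (out : List (String × List String)) : Prop := out = get_config_files_for_linters_alt linters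
instance (linters : List String) (out : List (String × List String)) : Decidable (Spec_get_config_files_for_linters linters out) := by unfold Spec_get_config_files_for_linters; infer_instance

-- ===== CLAIM (what is proved, stated in full; the proofs are below) =====
def Claim_equal_get_config_files_for_linters : Prop := ∀ (linters : List String), Dom_get_config_files_for_linters linters → Spec_get_config_files_for_linters linters (get_config_files_for_linters linters)

-- ===== LEMMAS AND PROOFS =====

-- the concrete value of B's inverted index
theorem pvIndexB_eq : pvIndexB = PySem.Dict.mk
    [("pylint", [".pylintrc", "pylintrc", ".pylintrc.toml"]),
     ("pytest", ["pytest.ini"]),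
     ("mypy", ["mypy.ini", ".mypy.ini"]),
     ("yamllint", [".yamllint", ".yamllint.yml", ".yamllint.yaml"]),
     ("jscpd", [".jscpd.json", ".jscpd.yml", ".jscpd.yaml", ".jscpd.toml", ".jscpdrc", ".jscpdrc.json", ".jscpdrc.yml", ".jscpdrc.yaml"])] := by decide

-- the two per-linter bodies agree on every string
theorem pvCfg_eq (s : String) : pvCfgA s = pvCfgB s := by
  by_cases h1 : s = "pylint"; · subst h1; decide
  by_cases h2 : s = "pytest"; · subst h2; decide
  by_cases h3 : s = "mypy"; · subst h3; decide
  by_cases h4 : s = "yamllint"; · subst h4; decide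
  by_cases h5 : s = "jscpd"; · subst h5; decide
  have e1 : ("pylint" == s) = false := by simp [Ne.symm h1]
  have e2 : ("pytest" == s) = false := by simp [Ne.symm h2]
  have e3 : ("mypy" == s) = false := by simp [Ne.symm h3]
  have e4 : ("yamllint" == s) = false := by simp [Ne.symm h4]
  have e5 : ("jscpd" == s) = false := by simp [Ne.symm h5]
  rw [pvCfgA, pvCfgB, pvIndexB_eq]
  simp [pvDEDpairs, pvSHARED, e1, e2, e3, e4, e5,
        PySem.Dict.contains, PySem.Dict.getD,
        PySem.Dict.empty, PySem.Dict.get?, PySem.List.sorted, List.filter]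

-- ===== VERDICT (by name: the statement is the Claim_ definition above) =====
theorem get_config_files_for_linters_spec : Claim_equal_get_config_files_for_linters := by
  intro linters _
  unfold Spec_get_config_files_for_linters get_config_files_for_linters get_config_files_for_linters_alt
  rw [funext pvCfg_eq]
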